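-- pv_equiv track=rewrite | github.com/easybuilders/easybuild-framework | easybuild/scripts/little_util_scripts/ec_manager.py | make_highest_version_list
-- ===== SOURCE A (Python) =====
-- def make_highest_version_list(apps_list):
--
--     highest_version = {}
--
--     for app in apps_list:
--         name = app['name']
--         vers = app['vers']
--         name_vers = name + "-" + vers
--
--         if (name in highest_version):
--             if (vers > highest_version[name]):
--                 highest_version[name] = vers
--         else:
--             highest_version[name] = vers
--
--     return highest_version
-- ===== SOURCE B (Python) =====
-- def make_highest_version_list(apps_list):
--     groups = {}
--     for app in apps_list:
--         groups.setdefault(app['name'], []).append(app['vers'])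
--     return {name: max(versions) for name, versions in groups.items()}
-- ===== Notes on version B (the rewrite author's own statement) =====
-- stated objective: alternative
-- what changed: B replaces A's inline running-max dict update with a two-pass collect-then-reduce: one pass groups every version per name into lists (dict of lists via setdefault), then a dict comprehension reduces each group with max; A's unused name_vers is dropped.
import Mathlib
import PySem

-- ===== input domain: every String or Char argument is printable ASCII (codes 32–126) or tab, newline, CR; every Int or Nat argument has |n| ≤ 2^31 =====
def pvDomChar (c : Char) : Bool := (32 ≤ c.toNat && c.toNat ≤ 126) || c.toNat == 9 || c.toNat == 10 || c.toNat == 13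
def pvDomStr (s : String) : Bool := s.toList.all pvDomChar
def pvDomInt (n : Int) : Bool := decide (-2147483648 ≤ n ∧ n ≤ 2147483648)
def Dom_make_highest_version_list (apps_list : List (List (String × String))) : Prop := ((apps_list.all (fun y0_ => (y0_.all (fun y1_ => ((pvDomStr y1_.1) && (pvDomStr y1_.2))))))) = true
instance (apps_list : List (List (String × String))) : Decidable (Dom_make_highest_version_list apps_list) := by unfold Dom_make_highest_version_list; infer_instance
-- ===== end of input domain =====

-- B groups all versions per name in one pass and reduces each group with max in a second pass,
-- instead of A's inline running-max update (objective: alternative decomposition; A's unused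
-- name_vers is dropped). Return-value equivalence; neither version mutates its argument.

-- ===== PORT A =====
-- app['name'] / app['vers'] are read as Dict.getD with an unreachable default: Pre_ below
-- guarantees both keys are present, exactly where Python's subscript does not raise KeyError.
-- highest_version[name] is read with getD, exact because it sits under 'contains name'.
def make_highest_version_list (apps_list : List (List (String × String))) : List (String × String) :=
  (apps_list.foldl (fun highest_version app =>
      let name := (PySem.Dict.ofList app).getD "name" ""
      let vers := (PySem.Dict.ofList app).getD "vers" ""
      if highest_version.contains name then
        if highest_version.getD name "" < vers then
          highest_version.insert name vers
        else
          highest_version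
      else
        highest_version.insert name vers)
    PySem.Dict.empty).items

-- ===== PORT B =====
-- groups.setdefault(app['name'], []).append(app['vers']) is Dict.modify with default [];
-- max(versions) is PySem.List.max? with identity key (the group is nonempty, default unreachable).
def make_highest_version_list_alt (apps_list : List (List (String × String))) : List (String × String) :=
  let groups := apps_list.foldl (fun g app =>
      g.modify ((PySem.Dict.ofList app).getD "name" "") []
        (fun l => l ++ [(PySem.Dict.ofList app).getD "vers" ""]))
    PySem.Dict.empty
  groups.items.map (fun p => (p.1, (PySem.List.max? p.2 (fun x => x)).getD ""))

-- ===== PRECONDITION & SPEC =====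
-- Pre_ excludes exactly the inputs where Python A raises KeyError: some app dict lacking a
-- "name" or "vers" key (B raises there too).
def Pre_make_highest_version_list (apps_list : List (List (String × String))) : Prop :=
  ∀ app ∈ apps_list, "name" ∈ app.map (·.1) ∧ "vers" ∈ app.map (·.1)
instance (apps_list : List (List (String × String))) : Decidable (Pre_make_highest_version_list apps_list) := by unfold Pre_make_highest_version_list; infer_instance
def pvWitness_make_highest_version_list : (List (List (String × String))) :=
  [[("name", "gcc"), ("vers", "4.8")], [("name", "gcc"), ("vers", "4.10")], [("name", "zlib"), ("vers", "1.2")]]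

def Spec_make_highest_version_list (apps_list : List (List (String × String))) (out : List (String × String)) : Prop := out = make_highest_version_list_alt apps_list
instance (apps_list : List (List (String × String))) (out : List (String × String)) : Decidable (Spec_make_highest_version_list apps_list out) := by unfold Spec_make_highest_version_list; infer_instance

-- ===== CLAIM (what is proved, stated in full; the proofs are below) =====
def Claim_equal_make_highest_version_list : Prop := ∀ (apps_list : List (List (String × String))), Dom_make_highest_version_list apps_list → Pre_make_highest_version_list apps_list → Spec_make_highest_version_list apps_list (make_highest_version_list apps_list)

-- ===== LEMMAS AND PROOFS =====

theorem pv_empty_str_le (s : String) : "" ≤ s := le_of_not_gt (by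
  intro h
  rw [String.lt_iff_toList_lt] at h
  exact List.not_lt_nil _ h)

-- max(vs) with no key, defaulted on [], is the running max from ""
theorem pv_max_getD (vs : List String) :
    (PySem.List.max? vs (fun x => x)).getD "" = vs.foldl max "" := by
  cases vs with
  | nil => simp [PySem.List.max?]
  | cons x t =>
    rw [PySem.List.max?_id_cons]
    simp [List.foldl_cons, max_eq_right (pv_empty_str_le x)]

-- one step of A's loop and of B's loop preserve the invariant: equal key lists, and A's
-- running max at each key equals the fold-max of B's version group there
theorem pv_step_pres (d : PySem.Dict String String) (g : PySem.Dict String (List String))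
    (n v : String)
    (hk : d.keys = g.keys)
    (hv : ∀ k, d.getD k "" = (g.getD k []).foldl max "") :
    ((if d.contains n then (if d.getD n "" < v then d.insert n v else d) else d.insert n v).keys
       = (g.modify n [] (fun l => l ++ [v])).keys)
    ∧ ∀ k, (if d.contains n then (if d.getD n "" < v then d.insert n v else d) else d.insert n v).getD k ""
       = ((g.modify n [] (fun l => l ++ [v])).getD k []).foldl max "" := by
  have hc : d.contains n = g.contains n := by
    rw [PySem.Dict.contains_eq_decide_mem_keys, PySem.Dict.contains_eq_decide_mem_keys, hk]
  have hg' : ∀ k, (g.modify n [] (fun l => l ++ [v])).getD k []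
      = if k = n then g.getD n [] ++ [v] else g.getD k [] :=
    fun k => PySem.Dict.getD_modify g n k [] _
  constructor
  · -- keys
    rw [PySem.Dict.keys_modify g n [] _]
    by_cases hcn : d.contains n = true
    · have hgn : g.contains n = true := hc ▸ hcn
      rw [PySem.Dict.keys_insert_of_contains g _ hgn, hcn, if_pos rfl]
      split
      · rw [PySem.Dict.keys_insert_of_contains d _ hcn]; exact hk
      · exact hk
    · have hdn : d.contains n = false := by revert hcn; cases d.contains n <;> simp
      have hgn : g.contains n = false := hc ▸ hdn
      rw [PySem.Dict.keys_insert_of_not_contains g _ hgn, hdn]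
      simp only [Bool.false_eq_true, if_false]
      rw [PySem.Dict.keys_insert_of_not_contains d _ hdn, hk]
  · -- values
    intro k
    rw [hg' k]
    by_cases hkn : k = n
    · subst hkn
      rw [if_pos rfl, List.foldl_append, ← hv k, List.foldl_cons, List.foldl_nil]
      by_cases hcn : d.contains k = true
      · rw [hcn, if_pos rfl, max_def_lt]
        split
        · rw [PySem.Dict.getD_insert]; simp
        · rfl
      · have hdn : d.contains k = false := by revert hcn; cases d.contains k <;> simp
        rw [hdn]
        simp only [Bool.false_eq_true, if_false]
        rw [PySem.Dict.getD_insert, if_pos rfl, PySem.Dict.getD_of_not_contains d "" hdn,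
          max_eq_right (pv_empty_str_le v)]
    · rw [if_neg hkn]
      by_cases hcn : d.contains n = true
      · rw [hcn, if_pos rfl]
        split
        · rw [PySem.Dict.getD_insert, if_neg hkn]; exact hv k
        · exact hv k
      · have hdn : d.contains n = false := by revert hcn; cases d.contains n <;> simp
        rw [hdn]
        simp only [Bool.false_eq_true, if_false]
        rw [PySem.Dict.getD_insert, if_neg hkn]
        exact hv k

-- the invariant carried along the whole list, both folds run in lock step
theorem pv_inv (apps : List (List (String × String))) :
    ∀ (d : PySem.Dict String String) (g : PySem.Dict String (List String)),
    d.keys = g.keys →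
    (∀ k, d.getD k "" = (g.getD k []).foldl max "") →
    ((apps.foldl (fun highest_version app =>
        let name := (PySem.Dict.ofList app).getD "name" ""
        let vers := (PySem.Dict.ofList app).getD "vers" ""
        if highest_version.contains name then
          if highest_version.getD name "" < vers then
            highest_version.insert name vers
          else
            highest_version
        else
          highest_version.insert name vers) d).keys
      = (apps.foldl (fun g app =>
          g.modify ((PySem.Dict.ofList app).getD "name" "") []
            (fun l => l ++ [(PySem.Dict.ofList app).getD "vers" ""])) g).keys)
    ∧ ∀ k, (apps.foldl (fun highest_version app =>
        let name := (PySem.Dict.ofList app).getD "name" ""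
        let vers := (PySem.Dict.ofList app).getD "vers" ""
        if highest_version.contains name then
          if highest_version.getD name "" < vers then
            highest_version.insert name vers
          else
            highest_version
        else
          highest_version.insert name vers) d).getD k ""
      = ((apps.foldl (fun g app =>
          g.modify ((PySem.Dict.ofList app).getD "name" "") []
            (fun l => l ++ [(PySem.Dict.ofList app).getD "vers" ""])) g).getD k []).foldl max "" := by
  induction apps with
  | nil => intro d g hk hv; exact ⟨hk, hv⟩
  | cons app rest ih =>
    intro d g hk hv
    simp only [List.foldl_cons]
    have step := pv_step_pres d g ((PySem.Dict.ofList app).getD "name" "")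
      ((PySem.Dict.ofList app).getD "vers" "") hk hv
    exact ih _ _ step.1 step.2

-- ===== VERDICT (by name: the statement is the Claim_ definition above) =====
theorem make_highest_version_list_spec : Claim_equal_make_highest_version_list := by
  unfold Claim_equal_make_highest_version_list
  intro apps _ _
  unfold Spec_make_highest_version_list
  unfold make_highest_version_list make_highest_version_list_alt
  obtain ⟨hk, hv⟩ := pv_inv apps PySem.Dict.empty PySem.Dict.empty rfl (fun _ => rfl)
  have hGnd : (apps.foldl (fun g app =>
      g.modify ((PySem.Dict.ofList app).getD "name" "") []
        (fun l => l ++ [(PySem.Dict.ofList app).getD "vers" ""])) PySem.Dict.empty).keys.Nodup := by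
    exact PySem.Dict.nodup_keys_foldl_modify_key apps
      (fun app => (PySem.Dict.ofList app).getD "name" "") []
      (fun _ app => fun l => l ++ [(PySem.Dict.ofList app).getD "vers" ""])
      PySem.Dict.empty (by simp [PySem.Dict.keys_empty])
  have hDnd : (apps.foldl (fun highest_version app =>
      let name := (PySem.Dict.ofList app).getD "name" ""
      let vers := (PySem.Dict.ofList app).getD "vers" ""
      if highest_version.contains name then
        if highest_version.getD name "" < vers then
          highest_version.insert name vers
        else
          highest_version
      else
        highest_version.insert name vers) PySem.Dict.empty).keys.Nodup := hk ▸ hGnd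
  show _ = List.map (fun p => (p.1, (PySem.List.max? p.2 (fun x => x)).getD ""))
      (apps.foldl (fun g app =>
        g.modify ((PySem.Dict.ofList app).getD "name" "") []
          (fun l => l ++ [(PySem.Dict.ofList app).getD "vers" ""])) PySem.Dict.empty).items
  rw [PySem.Dict.items_eq_map_keys _ hDnd "", PySem.Dict.items_eq_map_keys _ hGnd [],
    List.map_map, hk]
  apply List.map_congr_left
  intro k _
  simp only [Function.comp]
  rw [pv_max_getD, ← hv k]
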